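-- pv_equiv track=rewrite | github.com/VAlBHAV-AGARWAL/gstr1_difference_repo | GST_Compare_Tool.py | get_primary_keys
-- ===== SOURCE A (Python) =====
-- def get_primary_keys(columns):
--     cols = [str(c).strip() for c in columns]
--     keys = []
--
--     # Priority 1: Absolute Identifiers (Note No, Invoice No)
--     doc_ids = ['Invoice Number', 'Revised Invoice Number', 'Note Number', 'Revised Note Number', 'Document Number', 'Revised Document Number', 'Shipping Bill Number']
--     for col in cols:
--         if col in doc_ids: keys.append(col)
--
--     # IMPORTANT: If we found a Note Number or Invoice Number, WE STOP HERE.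
--     # This forces the system to treat GSTIN/Name changes as modifications to the existing row!
--     if keys:
--         return keys
--
--     # Priority 2: Composites (for b2cs and similar sheets without doc numbers)
--     composites = ['Place Of Supply', 'Original Place Of Supply', 'Rate', 'Type', 'Financial Year', 'Original Month', 'Nature of Supply', 'Export Type', 'HSN', 'Nature of Document', 'Description']
--     for col in cols:
--         if col in composites: keys.append(col)
--
--     # Priority 3: Context Identifiers
--     context_ids = ['GSTIN/UIN of Recipient', 'Supplier GSTIN/UIN', 'Recipient GSTIN/UIN', 'E-Commerce GSTIN', 'UQC', 'Sr. No. From']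
--     for col in cols:
--         if col in context_ids and col not in keys: keys.append(col)
--
--     return keys
-- ===== SOURCE B (Python) =====
-- DOC_IDS = ('Invoice Number', 'Revised Invoice Number', 'Note Number', 'Revised Note Number', 'Document Number', 'Revised Document Number', 'Shipping Bill Number')
-- COMPOSITES = ('Place Of Supply', 'Original Place Of Supply', 'Rate', 'Type', 'Financial Year', 'Original Month', 'Nature of Supply', 'Export Type', 'HSN', 'Nature of Document', 'Description')
-- CONTEXT_IDS = ('GSTIN/UIN of Recipient', 'Supplier GSTIN/UIN', 'Recipient GSTIN/UIN', 'E-Commerce GSTIN', 'UQC', 'Sr. No. From')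
--
-- def get_primary_keys(columns):
--     # One classifying pass: each normalized column goes into one of three tiers.
--     # The three tier lists are disjoint, so deduplicating tier3 against itself
--     # reproduces A's `col not in keys` check.
--     tier1, tier2, tier3 = [], [], []
--     for c in columns:
--         col = str(c).strip()
--         if col in DOC_IDS:
--             tier1.append(col)
--         elif col in COMPOSITES:
--             tier2.append(col)
--         elif col in CONTEXT_IDS and col not in tier3:
--             tier3.append(col)
--     return tier1 if tier1 else tier2 + tier3
-- ===== Notes on version B (the rewrite author's own statement) =====
-- stated objective: alternative
-- what changed: Replaces A's three successive scans over the column list (doc-id pass, early return, composite pass, context pass deduplicating against all keys) with a single classifying pass that buckets each normalized column into one of three disjoint tier lists and assembles the result afterwards.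
import Mathlib
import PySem

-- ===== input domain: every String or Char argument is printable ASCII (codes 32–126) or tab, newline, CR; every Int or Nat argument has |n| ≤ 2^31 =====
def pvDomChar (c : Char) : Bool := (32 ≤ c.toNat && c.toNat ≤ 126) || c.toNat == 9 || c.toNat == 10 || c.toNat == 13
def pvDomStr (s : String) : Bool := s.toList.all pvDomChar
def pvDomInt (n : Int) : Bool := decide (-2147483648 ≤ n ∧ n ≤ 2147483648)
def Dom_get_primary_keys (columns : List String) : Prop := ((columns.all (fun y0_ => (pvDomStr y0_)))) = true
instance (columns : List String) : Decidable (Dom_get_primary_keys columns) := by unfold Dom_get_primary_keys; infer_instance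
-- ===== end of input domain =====

-- B replaces A's three successive scans by a single classifying pass into three tier buckets (alternative decomposition, same cost).

-- ===== PORT A =====
def pvDocIds : List String := ["Invoice Number", "Revised Invoice Number", "Note Number", "Revised Note Number", "Document Number", "Revised Document Number", "Shipping Bill Number"]
def pvComposites : List String := ["Place Of Supply", "Original Place Of Supply", "Rate", "Type", "Financial Year", "Original Month", "Nature of Supply", "Export Type", "HSN", "Nature of Document", "Description"]
def pvContextIds : List String := ["GSTIN/UIN of Recipient", "Supplier GSTIN/UIN", "Recipient GSTIN/UIN", "E-Commerce GSTIN", "UQC", "Sr. No. From"]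

def get_primary_keys (columns : List String) : List String :=
  let cols := columns.map (fun c => PySem.Str.strip c)
  -- Priority 1 loop
  let keys := cols.foldl (fun ks col => if col ∈ pvDocIds then ks ++ [col] else ks) []
  if keys ≠ [] then keys
  else
    -- Priority 2 loop
    let keys := cols.foldl (fun ks col => if col ∈ pvComposites then ks ++ [col] else ks) keys
    -- Priority 3 loop, dedup against keys so far
    cols.foldl (fun ks col => if col ∈ pvContextIds ∧ col ∉ ks then ks ++ [col] else ks) keys

-- ===== PORT B =====
def pvStepB (t : List String × List String × List String) (c : String) :
    List String × List String × List String :=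
  let col := PySem.Str.strip c
  if col ∈ pvDocIds then (t.1 ++ [col], t.2.1, t.2.2)
  else if col ∈ pvComposites then (t.1, t.2.1 ++ [col], t.2.2)
  else if col ∈ pvContextIds ∧ col ∉ t.2.2 then (t.1, t.2.1, t.2.2 ++ [col])
  else t

def get_primary_keys_alt (columns : List String) : List String :=
  let t := columns.foldl pvStepB ([], [], [])
  if t.1 ≠ [] then t.1 else t.2.1 ++ t.2.2

-- ===== PRECONDITION & SPEC =====
def Spec_get_primary_keys (columns : List String) (out : List String) : Prop := out = get_primary_keys_alt columns
instance (columns : List String) (out : List String) : Decidable (Spec_get_primary_keys columns out) := by unfold Spec_get_primary_keys; infer_instance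

-- ===== CLAIM (what is proved, stated in full; the proofs are below) =====
def Claim_equal_get_primary_keys : Prop := ∀ (columns : List String), Dom_get_primary_keys columns → Spec_get_primary_keys columns (get_primary_keys columns)

-- ===== LEMMAS AND PROOFS =====

-- the three constant tier lists are pairwise disjoint
lemma doc_not_comp (x : String) (h : x ∈ pvDocIds) : x ∉ pvComposites := by
  simp only [pvDocIds, List.mem_cons, List.not_mem_nil, or_false] at h
  rcases h with rfl | rfl | rfl | rfl | rfl | rfl | rfl <;> decide

lemma doc_not_ctx (x : String) (h : x ∈ pvDocIds) : x ∉ pvContextIds := by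
  simp only [pvDocIds, List.mem_cons, List.not_mem_nil, or_false] at h
  rcases h with rfl | rfl | rfl | rfl | rfl | rfl | rfl <;> decide

lemma comp_not_ctx (x : String) (h : x ∈ pvComposites) : x ∉ pvContextIds := by
  simp only [pvComposites, List.mem_cons, List.not_mem_nil, or_false] at h
  rcases h with rfl | rfl | rfl | rfl | rfl | rfl | rfl | rfl | rfl | rfl | rfl <;> decide

-- A's loop bodies, named
def pvF1 (ks : List String) (col : String) : List String := if col ∈ pvDocIds then ks ++ [col] else ks
def pvF2 (ks : List String) (col : String) : List String := if col ∈ pvComposites then ks ++ [col] else ks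
def pvF3 (ks : List String) (col : String) : List String := if col ∈ pvContextIds ∧ col ∉ ks then ks ++ [col] else ks

-- B's single pass computes exactly the three loop results of A
lemma stepB_main (columns : List String) (a b c : List String) :
    columns.foldl pvStepB (a, b, c) =
      ((columns.map (fun x => PySem.Str.strip x)).foldl pvF1 a,
       (columns.map (fun x => PySem.Str.strip x)).foldl pvF2 b,
       (columns.map (fun x => PySem.Str.strip x)).foldl pvF3 c) := by
  induction columns generalizing a b c with
  | nil => rfl
  | cons x xs ih =>
    simp only [List.foldl_cons, List.map_cons]
    have hstep : pvStepB (a, b, c) x =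
        (pvF1 a (PySem.Str.strip x), pvF2 b (PySem.Str.strip x), pvF3 c (PySem.Str.strip x)) := by
      simp only [pvStepB, pvF1, pvF2, pvF3]
      set col := PySem.Str.strip x with hcol
      by_cases h1 : col ∈ pvDocIds
      · simp [h1, doc_not_comp col h1, doc_not_ctx col h1]
      · by_cases h2 : col ∈ pvComposites
        · simp [h1, h2, comp_not_ctx col h2]
        · by_cases h3 : col ∈ pvContextIds ∧ col ∉ c
          · simp [h1, h2, h3]
          · simp [h1, h2, h3]
    rw [hstep, ih]

-- A's pass-2 accumulator only gathers composite columns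
lemma f2_mem (cols : List String) (acc : List String) (hacc : ∀ x ∈ acc, x ∈ pvComposites) :
    ∀ x ∈ cols.foldl pvF2 acc, x ∈ pvComposites := by
  induction cols generalizing acc with
  | nil => exact hacc
  | cons y ys ih =>
    intro x hx
    refine ih (pvF2 acc y) ?_ x hx
    intro z hz
    unfold pvF2 at hz
    split at hz
    · rcases List.mem_append.mp hz with h | h
      · exact hacc z h
      · simp only [List.mem_singleton] at h; subst h; assumption
    · exact hacc z hz

-- A's pass-3 over a seed p ++ q with p disjoint from the context ids splits off p
lemma f3_prefix (cols : List String) (p q : List String) (hp : ∀ x ∈ p, x ∉ pvContextIds) :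
    cols.foldl pvF3 (p ++ q) = p ++ cols.foldl pvF3 q := by
  induction cols generalizing q with
  | nil => rfl
  | cons y ys ih =>
    simp only [List.foldl_cons]
    have hstep : pvF3 (p ++ q) y = p ++ pvF3 q y := by
      unfold pvF3
      by_cases hy : y ∈ pvContextIds
      · have hyp : y ∉ p := fun h => hp y h hy
        by_cases hq : y ∈ q
        · simp [hy, hq]
        · have : y ∉ p ++ q := by simp [hyp, hq]
          simp [hy, hq, this, List.append_assoc]
      · simp [hy]
    rw [hstep, ih]

theorem get_primary_keys_eq_alt (columns : List String) :
    get_primary_keys columns = get_primary_keys_alt columns := by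
  unfold get_primary_keys get_primary_keys_alt
  rw [stepB_main]
  have e1 : (fun ks col => if col ∈ pvDocIds then ks ++ [col] else ks) = pvF1 := rfl
  have e2 : (fun ks col => if col ∈ pvComposites then ks ++ [col] else ks) = pvF2 := rfl
  have e3 : (fun ks col => if col ∈ pvContextIds ∧ col ∉ ks then ks ++ [col] else ks) = pvF3 := rfl
  simp only [e1, e2, e3]
  set cols := columns.map (fun x => PySem.Str.strip x) with hcols
  split_ifs with h1
  · rfl
  · simp only [ne_eq, not_not] at h1
    rw [h1]
    have hmem : ∀ x ∈ cols.foldl pvF2 [], x ∈ pvComposites :=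
      f2_mem cols [] (by intro x hx; simp at hx)
    have := f3_prefix cols (cols.foldl pvF2 []) []
      (fun x hx => comp_not_ctx x (hmem x hx))
    simpa using this

-- ===== VERDICT (by name: the statement is the Claim_ definition above) =====
theorem get_primary_keys_spec : Claim_equal_get_primary_keys := by
  intro columns _
  unfold Spec_get_primary_keys
  exact get_primary_keys_eq_alt columns
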